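-- pv_equiv track=rewrite | github.com/doszilab/afflecto | bin/afflecto_core.py | positions_to_ranges
-- ===== SOURCE A (Python) =====
-- from typing import Dict, List, Optional, Tuple
--
-- def positions_to_ranges(pos: List[int]) -> List[List[int]]:
--     if not pos:
--         return []
--
--     pos = sorted(pos)
--     ranges: List[List[int]] = []
--     s = pos[0]
--     e = pos[0]
--
--     for x in pos[1:]:
--         if x == e + 1:
--             e = x
--         else:
--             ranges.append([s, e])
--             s = e = x
--
--     ranges.append([s, e])
--     return ranges
-- ===== SOURCE B (Python) =====
-- def positions_to_ranges(pos):
--     if not pos: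
--         return []
--     a = sorted(pos)
--     breaks = [(x, y) for x, y in zip(a, a[1:]) if y != x + 1]
--     starts = [a[0]] + [y for _, y in breaks]
--     ends = [x for x, _ in breaks] + [a[-1]]
--     return [[s, e] for s, e in zip(starts, ends)]
-- ===== Notes on version B (the rewrite author's own statement) =====
-- stated objective: alternative
-- what changed: Replaces A's single stateful scan with rolling (s, e) accumulators by staged passes: zip the sorted list with its own tail to collect the break pairs where y != x+1, then stitch range starts ([a[0]] plus each break's right value) with range ends (each break's left value plus a[-1]).
import Mathlib
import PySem

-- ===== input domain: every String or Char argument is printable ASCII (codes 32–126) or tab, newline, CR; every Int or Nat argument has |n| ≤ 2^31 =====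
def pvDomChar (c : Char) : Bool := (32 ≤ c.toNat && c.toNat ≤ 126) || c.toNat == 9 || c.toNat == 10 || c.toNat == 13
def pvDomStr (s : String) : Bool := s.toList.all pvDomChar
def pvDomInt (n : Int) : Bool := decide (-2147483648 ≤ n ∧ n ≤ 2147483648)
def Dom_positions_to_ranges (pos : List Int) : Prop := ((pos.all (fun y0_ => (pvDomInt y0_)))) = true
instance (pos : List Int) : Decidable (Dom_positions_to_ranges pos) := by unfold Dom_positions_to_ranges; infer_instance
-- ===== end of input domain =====

-- ===== PORT A =====
-- B differs in decomposition: A folds once over the sorted tail with rolling (ranges, s, e)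
-- state; B builds the break pairs by zipping the sorted list with its tail, then stitches
-- the start and end columns. Same values on every input (both total).
-- loop body of A's for-loop (named for use in the proofs)
def stepA (st : List (List Int) × Int × Int) (x : Int) : List (List Int) × Int × Int :=
  let (ranges, s, e) := st
  if x = e + 1 then (ranges, s, x) else (ranges ++ [[s, e]], x, x)

def positions_to_ranges (pos : List Int) : List (List Int) :=
  if pos = [] then []
  else
    match PySem.List.sorted pos (fun x => x) false with
    | [] => []   -- unreachable: sorted of a nonempty list is nonempty
    | p0 :: rest =>
      let st := rest.foldl stepA ([], p0, p0)
      st.1 ++ [[st.2.1, st.2.2]]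

-- ===== PORT B =====
-- a[0] / a[-1] are ported as pyGet? with default 0: a is nonempty on this branch, so the
-- default is unreachable and the indexing is exact.
def positions_to_ranges_alt (pos : List Int) : List (List Int) :=
  if pos = [] then []
  else
    let a := PySem.List.sorted pos (fun x => x) false
    let breaks := (a.zip (PySem.List.slice a (some 1) none)).filter
      (fun p => decide (p.2 ≠ p.1 + 1))
    let starts := (PySem.List.pyGet? a 0).getD 0 :: breaks.map Prod.snd
    let ends := breaks.map Prod.fst ++ [(PySem.List.pyGet? a (-1)).getD 0]
    (starts.zip ends).map (fun p => [p.1, p.2])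

-- ===== PRECONDITION & SPEC =====
def Spec_positions_to_ranges (pos : List Int) (out : List (List Int)) : Prop := out = positions_to_ranges_alt pos
instance (pos : List Int) (out : List (List Int)) : Decidable (Spec_positions_to_ranges pos out) := by unfold Spec_positions_to_ranges; infer_instance

-- ===== CLAIM (what is proved, stated in full; the proofs are below) =====
def Claim_equal_positions_to_ranges : Prop := ∀ (pos : List Int), Dom_positions_to_ranges pos → Spec_positions_to_ranges pos (positions_to_ranges pos)

-- ===== LEMMAS AND PROOFS =====

-- proof-only helpers: a canonical "maximal consecutive run" recursion both ports are reduced to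
def splitRun : Int → List Int → Int × List Int
  | e, [] => (e, [])
  | e, x :: xs => if x = e + 1 then splitRun x xs else (e, x :: xs)

theorem splitRun_len (e : Int) (xs : List Int) : (splitRun e xs).2.length ≤ xs.length := by
  induction xs generalizing e with
  | nil => simp [splitRun]
  | cons x xs ih =>
    simp only [splitRun]
    split
    · exact le_trans (ih x) (Nat.le_succ _)
    · simp

def runsAux (out : List (List Int)) : List Int → List (List Int)
  | [] => out
  | x :: xs =>
    let p := splitRun x xs
    runsAux (out ++ [[x, p.1]]) p.2
termination_by a => a.length
decreasing_by
  simpa using Nat.lt_succ_of_le (splitRun_len x xs)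

theorem runsAux_nil (out : List (List Int)) : runsAux out [] = out := by rw [runsAux]

theorem runsAux_cons (out : List (List Int)) (x : Int) (xs : List Int) :
    runsAux out (x :: xs)
      = runsAux (out ++ [[x, (splitRun x xs).1]]) (splitRun x xs).2 := by rw [runsAux]

theorem runsAux_append_aux (n : Nat) :
    ∀ (out : List (List Int)) (a : List Int), a.length ≤ n → runsAux out a = out ++ runsAux [] a := by
  induction n with
  | zero =>
    intro out a ha
    have : a = [] := List.eq_nil_of_length_eq_zero (Nat.le_zero.mp ha)
    subst this; simp [runsAux_nil]
  | succ n ih =>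
    intro out a ha
    match a with
    | [] => simp [runsAux_nil]
    | x :: xs =>
      rw [runsAux_cons, runsAux_cons]
      have hl : (splitRun x xs).2.length ≤ n := by
        have := splitRun_len x xs
        simp at ha
        omega
      have key : ∀ o, runsAux o (splitRun x xs).2 = o ++ runsAux [] (splitRun x xs).2 :=
        fun o => ih o _ hl
      simp only [List.nil_append]
      rw [key (out ++ [[x, (splitRun x xs).1]]), key [[x, (splitRun x xs).1]]]
      simp

theorem runsAux_append (out : List (List Int)) (a : List Int) :
    runsAux out a = out ++ runsAux [] a :=
  runsAux_append_aux a.length out a (le_refl _)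

-- A's fold equals the run recursion
theorem fold_runs (xs : List Int) (ranges : List (List Int)) (s e : Int) :
    (xs.foldl stepA (ranges, s, e)).1
      ++ [[(xs.foldl stepA (ranges, s, e)).2.1, (xs.foldl stepA (ranges, s, e)).2.2]]
    = ranges ++ ([s, (splitRun e xs).1] :: runsAux [] (splitRun e xs).2) := by
  induction xs generalizing ranges s e with
  | nil => simp [splitRun, runsAux_nil]
  | cons x xs ih =>
    simp only [List.foldl_cons, splitRun, stepA]
    by_cases h : x = e + 1
    · simp only [if_pos h]
      exact ih ranges s x
    · simp only [if_neg h]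
      rw [ih (ranges ++ [[s, e]]) x x, runsAux_cons]
      simp only [List.nil_append]
      rw [runsAux_append [[x, (splitRun x xs).1]]]
      simp

-- B's break pairs, as a function of the (sorted) list
def brkL (a : List Int) : List (Int × Int) :=
  (a.zip a.tail).filter (fun p => decide (p.2 ≠ p.1 + 1))

-- B's stitched output with an explicit current start s
def stitch (s : Int) (a : List Int) : List (List Int) :=
  ((s :: (brkL a).map Prod.snd).zip ((brkL a).map Prod.fst ++ [a.getLast?.getD 0])).map
    (fun p => [p.1, p.2])

theorem brkL_cons_cons (x y : Int) (ys : List Int) :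
    brkL (x :: y :: ys) = (if y = x + 1 then [] else [(x, y)]) ++ brkL (y :: ys) := by
  by_cases h : y = x + 1 <;> simp [brkL, h]

theorem stitch_runs (xs : List Int) : ∀ (x s : Int),
    stitch s (x :: xs)
      = [s, (splitRun x xs).1] ::
          (match (splitRun x xs).2 with
           | [] => []
           | z :: zs => stitch z (z :: zs)) := by
  induction xs with
  | nil => intro x s; simp [stitch, brkL, splitRun]
  | cons y ys ih =>
    intro x s
    by_cases h : y = x + 1
    · have hb : brkL (x :: y :: ys) = brkL (y :: ys) := by simp [brkL_cons_cons, h]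
      have hl : (x :: y :: ys).getLast?.getD 0 = (y :: ys).getLast?.getD 0 := by
        simp [List.getLast?_cons_cons]
      have : stitch s (x :: y :: ys) = stitch s (y :: ys) := by
        simp [stitch, hb]
      rw [this, ih y s]
      simp [splitRun, h]
    · have hb : brkL (x :: y :: ys) = (x, y) :: brkL (y :: ys) := by
        simp [brkL_cons_cons, h]
      have hl : (x :: y :: ys).getLast?.getD 0 = (y :: ys).getLast?.getD 0 := by
        simp [List.getLast?_cons_cons]
      have hs : splitRun x (y :: ys) = (x, y :: ys) := by simp [splitRun, h]
      rw [hs]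
      have : stitch s (x :: y :: ys) = [s, x] :: stitch y (y :: ys) := by
        simp [stitch, hb]
      rw [this]
  -- goal closed in both branches

theorem stitch_eq_runsAux_aux (n : Nat) :
    ∀ (a : List Int) (x : Int) (xs : List Int), a = x :: xs → a.length ≤ n →
      stitch x a = runsAux [] a := by
  induction n with
  | zero => intro a x xs he hl; subst he; simp at hl
  | succ n ih =>
    intro a x xs he hl
    subst he
    rw [stitch_runs xs x x, runsAux_cons, List.nil_append, runsAux_append]
    have hlen := splitRun_len x xs
    match hz : (splitRun x xs).2 with
    | [] => simp [runsAux_nil]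
    | z :: zs =>
      have : (z :: zs).length ≤ n := by
        rw [← hz]; simp at hl; omega
      simp [ih (z :: zs) z zs rfl this]

theorem stitch_eq_runsAux (x : Int) (xs : List Int) :
    stitch x (x :: xs) = runsAux [] (x :: xs) :=
  stitch_eq_runsAux_aux (x :: xs).length (x :: xs) x xs rfl (le_refl _)

-- B unfolded to stitch on the nonempty sorted list
theorem alt_eq_stitch (x : Int) (xs : List Int) (pos : List Int) (hp : pos ≠ [])
    (h : PySem.List.sorted pos (fun x => x) false = x :: xs) :
    positions_to_ranges_alt pos = stitch x (x :: xs) := by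
  unfold positions_to_ranges_alt
  rw [if_neg hp, h]
  simp [stitch, brkL, PySem.List.slice_from_one, PySem.List.pyGet?_neg_one]

-- ===== VERDICT (by name: the statement is the Claim_ definition above) =====
theorem positions_to_ranges_spec : Claim_equal_positions_to_ranges := by
  intro pos _
  unfold Spec_positions_to_ranges
  by_cases hp : pos = []
  · subst hp; simp [positions_to_ranges, positions_to_ranges_alt]
  · have hs : PySem.List.sorted pos (fun x => x) false ≠ [] := by
      simpa [PySem.List.sorted_eq_nil_iff] using hp
    match h : PySem.List.sorted pos (fun x => x) false with
    | [] => exact absurd h hs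
    | p0 :: rest =>
      rw [alt_eq_stitch p0 rest pos hp h, stitch_eq_runsAux]
      unfold positions_to_ranges
      rw [if_neg hp]
      rw [runsAux_cons, List.nil_append, runsAux_append]
      simp only [h]
      simpa using fold_runs rest [] p0 p0
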